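-- pv_equiv track=rewrite | github.com/nsimeyroneinc/NSITerm2024 | python/DS0011/Ex1.py | retourner_antoine
-- ===== SOURCE A (Python) =====
-- def creer_pile_vide():
--     return []
--
-- def est_vide(P):
--     if P==[]:
--         return True
--     else:
--         return False
--
-- def empiler(P,x):
--     P.append(x)
--
-- def depiler(P):
--     if est_vide(P) == True :
--         raise IndexError("Vous avez essayé de dépiler une pile vide !")
--     else :
--         return P.pop()
--
-- def retourner_antoine(P,j):
--     Q1=creer_pile_vide()
--     Q2=creer_pile_vide()
--
--     for i in range(j):
--         x=depiler(P)
--         empiler(Q1,x)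
--
--     while not est_vide(Q1):
--         x=depiler(Q1)
--         empiler(Q2,x)
--     while not est_vide(Q2):
--         x=depiler(Q2)
--         empiler(P,x)
--     return P
-- ===== SOURCE B (Python) =====
-- def creer_pile_vide():
--     return []
--
-- def est_vide(P):
--     if P==[]:
--         return True
--     else:
--         return False
--
-- def empiler(P,x):
--     P.append(x)
--
-- def depiler(P):
--     if est_vide(P) == True :
--         raise IndexError("Vous avez essayé de dépiler une pile vide !")
--     else :
--         return P.pop()
--
-- def retourner_antoine(P,j):
--     # Pop the top j elements one at a time into a single list L:
--     # L then holds them top-first, i.e. already reversed relative to P.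
--     L = []
--     for i in range(j):
--         L.append(depiler(P))
--     # Push them back in that order: one net reversal of the top j elements.
--     for x in L:
--         empiler(P, x)
--     return P
-- ===== Notes on version B (the rewrite author's own statement) =====
-- stated objective: simpler
-- what changed: Replaces A's two auxiliary stacks and three transfer loops (pop j into Q1, drain Q1 into Q2, drain Q2 back into P) with one temporary list and two loops: pop the top j elements into L (which leaves them reversed) and push L back onto P.
import Mathlib
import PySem

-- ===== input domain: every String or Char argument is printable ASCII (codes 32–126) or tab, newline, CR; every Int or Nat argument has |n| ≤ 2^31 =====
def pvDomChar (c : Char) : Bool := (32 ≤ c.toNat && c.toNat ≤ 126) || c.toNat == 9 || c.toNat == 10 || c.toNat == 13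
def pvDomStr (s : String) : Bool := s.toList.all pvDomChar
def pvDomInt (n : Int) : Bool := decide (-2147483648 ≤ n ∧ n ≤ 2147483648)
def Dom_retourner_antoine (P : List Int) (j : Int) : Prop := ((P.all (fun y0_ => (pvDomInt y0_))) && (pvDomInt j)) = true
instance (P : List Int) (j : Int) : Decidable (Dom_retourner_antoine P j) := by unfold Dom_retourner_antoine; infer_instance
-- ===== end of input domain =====

-- B replaces A's two auxiliary stacks and three transfer loops with one temporary
-- list and two loops (simpler decomposition, same cost). Equivalence is about the
-- returned list value; both Pythons mutate P in place identically.

-- ===== PORT A =====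
-- for i in range(j): x=depiler(P); empiler(Q1,x)  — depiler pops the LAST element
-- (PySem.List.pop? with default index -1); on an empty pile Python raises
-- IndexError, which Pre_ excludes (the branch returns the state unchanged).
def pvLoop1A : Nat → List Int → List Int → List Int × List Int
  | 0, P, Q1 => (P, Q1)
  | n+1, P, Q1 =>
    match PySem.List.pop? P (-1) with
    | some (x, P') => pvLoop1A n P' (Q1 ++ [x])
    | none => (P, Q1)

-- while not est_vide(S): x=depiler(S); empiler(dst,x)
def pvDrain (src dst : List Int) : List Int :=
  match h : PySem.List.pop? src (-1) with
  | some (x, src') => pvDrain src' (dst ++ [x])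
  | none => dst
termination_by src.length
decreasing_by
  have := PySem.List.length_of_pop?_eq_some src h
  simp at this
  omega

def retourner_antoine (P : List Int) (j : Int) : List Int :=
  let s := pvLoop1A j.toNat P []
  let Q2 := pvDrain s.2 []
  pvDrain Q2 s.1

-- ===== PORT B =====
-- for i in range(j): L.append(depiler(P))
def pvLoopB : Nat → List Int → List Int → List Int × List Int
  | 0, P, L => (P, L)
  | n+1, P, L =>
    match PySem.List.pop? P (-1) with
    | some (x, P') => pvLoopB n P' (L ++ [x])
    | none => (P, L)

def retourner_antoine_alt (P : List Int) (j : Int) : List Int :=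
  let s := pvLoopB j.toNat P []
  -- for x in L: empiler(P, x)
  List.foldl (fun acc x => acc ++ [x]) s.1 s.2

-- ===== PRECONDITION & SPEC =====
-- Pre_ excludes exactly the inputs where A raises IndexError: popping j elements
-- needs j ≤ len(P) (a negative j is a no-op and is admitted).
def Pre_retourner_antoine (P : List Int) (j : Int) : Prop := j ≤ (P.length : Int)
instance (P : List Int) (j : Int) : Decidable (Pre_retourner_antoine P j) := by
  unfold Pre_retourner_antoine; infer_instance
def pvWitness_retourner_antoine : List Int × Int := ([1, 2, 3, 4], 3)

def Spec_retourner_antoine (P : List Int) (j : Int) (out : List Int) : Prop := out = retourner_antoine_alt P j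
instance (P : List Int) (j : Int) (out : List Int) : Decidable (Spec_retourner_antoine P j out) := by unfold Spec_retourner_antoine; infer_instance

-- ===== CLAIM (what is proved, stated in full; the proofs are below) =====
def Claim_equal_retourner_antoine : Prop := ∀ (P : List Int) (j : Int), Dom_retourner_antoine P j → Pre_retourner_antoine P j → Spec_retourner_antoine P j (retourner_antoine P j)

-- ===== LEMMAS AND PROOFS =====

-- A's first loop and B's first loop are the same Python loop: same recursion.
theorem pvLoop1A_eq_loopB : ∀ (n : Nat) (P Q : List Int), pvLoop1A n P Q = pvLoopB n P Q := by
  intro n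
  induction n with
  | zero => intro P Q; rfl
  | succ n ih =>
    intro P Q
    simp only [pvLoop1A, pvLoopB]
    cases h : PySem.List.pop? P (-1) with
    | none => rfl
    | some r => exact ih _ _

theorem pop?_last_eq (xs : List Int) (x : Int) :
    PySem.List.pop? (xs ++ [x]) (-1) = some (x, xs) := by
  simpa using PySem.List.pop?_last (xs := xs) (x := x)

theorem pop?_nil : PySem.List.pop? ([] : List Int) (-1) = none := by decide

-- pvDrain src dst = dst ++ src.reverse
theorem pvDrain_eq (src dst : List Int) : pvDrain src dst = dst ++ src.reverse := by
  induction src using List.reverseRecOn generalizing dst with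
  | nil =>
    rw [pvDrain.eq_def]
    split
    · simp_all [pop?_nil]
    · simp
  | append_singleton xs x ih =>
    rw [pvDrain.eq_def]
    split
    · rename_i x1 src' h
      rw [pop?_last_eq] at h
      simp only [Option.some.injEq, Prod.mk.injEq] at h
      obtain ⟨rfl, rfl⟩ := h
      simp [ih]
    · rename_i h
      rw [pop?_last_eq] at h
      cases h

theorem foldl_append_eq (L acc : List Int) :
    List.foldl (fun acc x => acc ++ [x]) acc L = acc ++ L := by
  induction L generalizing acc with
  | nil => simp
  | cons a l ih => simp [List.foldl, ih]

-- ===== VERDICT (by name: the statement is the Claim_ definition above) =====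
theorem retourner_antoine_spec : Claim_equal_retourner_antoine := by
  intro P j _ _
  unfold Spec_retourner_antoine retourner_antoine retourner_antoine_alt
  rw [pvLoop1A_eq_loopB, pvDrain_eq, pvDrain_eq, foldl_append_eq]
  simp
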